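-- pv_equiv track=rewrite | github.com/AMCAS2020/mechanics | LeafInterrogator/leafi/helper.py | check_dict_validation
-- ===== SOURCE A (Python) =====
-- def check_dict_validation(image_dict):
--     if type(image_dict) != dict:
--         raise ValueError('The input is not a dictionary!')
--
--     for counter in range(1, len(image_dict) + 1):
--         try:
--             _ = image_dict[counter]
--         except KeyError:
--             return False
--
--     return True
-- ===== SOURCE B (Python) =====
-- def check_dict_validation(image_dict):
--     if type(image_dict) != dict:
--         raise ValueError('The input is not a dictionary!')
--     n = len(image_dict)
--     return all(1 <= k <= n for k in image_dict)
-- ===== Notes on version B (the rewrite author's own statement) =====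
-- stated objective: alternative
-- what changed: Instead of probing keys 1..n in the dict with early exit, B makes one pass over the dict's own keys and checks each lies in [1, n]; since a dict's n keys are distinct, this bound check is equivalent to the keys being exactly 1..n by pigeonhole.
import Mathlib
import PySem

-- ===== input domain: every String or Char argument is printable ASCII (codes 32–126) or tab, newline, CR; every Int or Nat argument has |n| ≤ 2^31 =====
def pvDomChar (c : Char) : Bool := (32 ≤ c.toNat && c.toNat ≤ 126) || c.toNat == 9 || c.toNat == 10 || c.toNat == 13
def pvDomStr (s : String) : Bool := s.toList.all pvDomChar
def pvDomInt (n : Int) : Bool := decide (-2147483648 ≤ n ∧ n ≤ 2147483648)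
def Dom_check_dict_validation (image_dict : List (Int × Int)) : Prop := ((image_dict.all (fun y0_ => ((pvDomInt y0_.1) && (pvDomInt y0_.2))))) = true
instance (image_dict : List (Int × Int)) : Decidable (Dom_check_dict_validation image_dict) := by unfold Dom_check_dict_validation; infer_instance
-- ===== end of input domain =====

-- B replaces A's sequential probing of keys 1..n in the dict (early return on the first
-- missing key) with one pass over the dict's OWN keys checking each lies in [1, n]
-- (equivalent by pigeonhole since the n keys are distinct); objective: alternative.
-- The 'type(...) != dict' guard is outside the model (the argument is always a dict here).

-- ===== PORT A =====
-- literal port of A: probe keys 1..len(d); the early-return-False loop is the conjunction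
-- over range(1, len+1) of 'counter in d' (try d[counter] / except KeyError).
def check_dict_validation (image_dict : List (Int × Int)) : Bool :=
  let d := PySem.Dict.ofList image_dict
  (PySem.List.pyRange 1 ((d.size : Int) + 1) 1).all (fun counter => d.contains counter)

-- ===== PORT B =====
-- literal port of B: n = len(d); all(1 <= k <= n for k in d)
def check_dict_validation_alt (image_dict : List (Int × Int)) : Bool :=
  let d := PySem.Dict.ofList image_dict
  let n : Int := d.size
  d.keys.all (fun k => decide (1 ≤ k) && decide (k ≤ n))

-- ===== PRECONDITION & SPEC =====
def Spec_check_dict_validation (image_dict : List (Int × Int)) (out : Bool) : Prop := out = check_dict_validation_alt image_dict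
instance (image_dict : List (Int × Int)) (out : Bool) : Decidable (Spec_check_dict_validation image_dict out) := by unfold Spec_check_dict_validation; infer_instance

-- ===== CLAIM (what is proved, stated in full; the proofs are below) =====
def Claim_equal_check_dict_validation : Prop := ∀ (image_dict : List (Int × Int)), Dom_check_dict_validation image_dict → Spec_check_dict_validation image_dict (check_dict_validation image_dict)

-- ===== LEMMAS AND PROOFS =====

-- the keys of an ofList dict are exactly size-many
theorem pv_keys_length (d : PySem.Dict Int Int) : d.keys.length = d.size := by
  simp [PySem.Dict.keys, PySem.Dict.size]

-- main lemma: for a dict with n distinct keys, probing 1..n all succeed ⟺ every key is in [1, n]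
-- (pigeonhole: n distinct keys ⊇ {1..n} ⟺ ⊆ {1..n}, both via a permutation argument)
theorem pv_probe_eq_bounds (d : PySem.Dict Int Int) (hnd : d.keys.Nodup) :
    (PySem.List.pyRange 1 ((d.size : Int) + 1) 1).all (fun c => d.contains c)
      = d.keys.all (fun k => decide (1 ≤ k) && decide (k ≤ (d.size : Int))) := by
  have hlen : (PySem.List.pyRange 1 ((d.size : Int) + 1) 1).length = d.keys.length := by
    rw [PySem.List.length_pyRange_one, pv_keys_length]; omega
  have hndr := PySem.List.nodup_pyRange_one 1 ((d.size : Int) + 1)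
  rw [Bool.eq_iff_iff]
  simp only [List.all_eq_true, Bool.and_eq_true, decide_eq_true_eq]
  constructor
  · -- probes succeed ⇒ range ⊆ keys ⇒ (lengths equal) perm ⇒ keys ⊆ range ⇒ bounds
    intro hall
    have hsub : ∀ c ∈ PySem.List.pyRange 1 ((d.size : Int) + 1) 1, c ∈ d.keys := by
      intro c hc
      exact (PySem.Dict.contains_iff_mem_keys d c).1 (hall c hc)
    have hperm : List.Perm (PySem.List.pyRange 1 ((d.size : Int) + 1) 1) d.keys :=
      (hndr.subperm hsub).perm_of_length_le (le_of_eq hlen.symm)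
    intro k hk
    have : k ∈ PySem.List.pyRange 1 ((d.size : Int) + 1) 1 := hperm.mem_iff.2 hk
    have := (PySem.List.mem_pyRange_one).1 this
    exact ⟨this.1, by omega⟩
  · -- bounds hold ⇒ keys ⊆ range ⇒ (lengths equal) perm ⇒ range ⊆ keys ⇒ probes succeed
    intro hb
    have hsub : ∀ k ∈ d.keys, k ∈ PySem.List.pyRange 1 ((d.size : Int) + 1) 1 := by
      intro k hk
      have := hb k hk
      exact (PySem.List.mem_pyRange_one).2 ⟨this.1, by omega⟩
    have hperm : List.Perm d.keys (PySem.List.pyRange 1 ((d.size : Int) + 1) 1) :=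
      (hnd.subperm hsub).perm_of_length_le (le_of_eq hlen)
    intro c hc
    exact (PySem.Dict.contains_iff_mem_keys d c).2 (hperm.mem_iff.2 hc)

-- ===== VERDICT (by name: the statement is the Claim_ definition above) =====
theorem check_dict_validation_spec : Claim_equal_check_dict_validation := by
  intro image_dict _
  unfold Spec_check_dict_validation check_dict_validation check_dict_validation_alt
  exact pv_probe_eq_bounds _ (PySem.Dict.nodup_keys_ofList image_dict)
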